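-- pv_equiv track=rewrite | github.com/on1dds/tmon | src/config.py | _parse
-- ===== SOURCE A (Python) =====
-- def _parse(line):
--     chars = []
--     for c in line:
--         chars.append(c)
--
--     inquote = False
--     for x in range(0, len(chars)):
--         if chars[x] == '"' or chars[x] == '\r':
--             chars[x] = '\n'
--             inquote = not inquote
--         if not inquote and (chars[x] == ' ' or chars[x] == '\t'):
--             chars[x] = '\n'
--
--     _lastwasn = False
--     s = ""
--     for x in range(0, len(chars)):
--         if chars[x] != '\n':
--             s += chars[x]
--             _lastwasn = False
--         elif chars[x] == '\n':
--             if not _lastwasn: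
--                 s += '\n'
--                 _lastwasn = True
--     while s[len(s) - 1:] == '\n':
--         s = s[:len(s) - 1]
--     return s.split('\n')
-- ===== SOURCE B (Python) =====
-- def _parse(line):
--     out = []
--     inquote = False
--     for c in line:
--         if c == '"' or c == '\r':
--             inquote = not inquote
--             out.append('\n')
--         elif (c == ' ' or c == '\t') and not inquote:
--             out.append('\n')
--         else:
--             out.append(c)
--     s = ''.join(out)
--     fields = [f for f in s.split('\n') if f]
--     if not fields:
--         return ['']
--     if s.startswith('\n'):
--         return [''] + fields
--     return fields
-- ===== Notes on version B (the rewrite author's own statement) =====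
-- stated objective: simpler
-- what changed: B keeps one separator-normalization pass over the line but replaces A's char-list copy, in-place index-loop rewriting, run-collapse loop and trailing-strip while-loop by a single split on the newline separator followed by filtering out empty fields (re-adding the leading empty field when the line starts with a separator).
import Mathlib
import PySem

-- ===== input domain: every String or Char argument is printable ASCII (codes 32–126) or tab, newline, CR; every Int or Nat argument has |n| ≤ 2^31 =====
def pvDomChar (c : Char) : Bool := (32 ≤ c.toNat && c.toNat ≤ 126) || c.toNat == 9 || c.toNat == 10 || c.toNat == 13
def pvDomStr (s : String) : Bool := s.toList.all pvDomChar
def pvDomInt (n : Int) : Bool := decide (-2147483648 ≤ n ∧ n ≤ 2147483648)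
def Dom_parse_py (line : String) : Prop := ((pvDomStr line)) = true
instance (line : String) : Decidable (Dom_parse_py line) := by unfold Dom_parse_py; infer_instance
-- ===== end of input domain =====

-- B replaces A's collapse-runs loop and trailing-strip while-loop by one split/filter pass over the
-- normalized string (objective: simpler).

-- ===== PORT A =====

-- loop bodies of the ports, named so the loop lemmas below can refer to them
def pvStepA2 (acc : List Char × Bool) (c : Char) : List Char × Bool :=
  let r : Char × Bool := if c = '"' ∨ c = '\r' then ('\n', !acc.2) else (c, acc.2)
  let c2 : Char := if r.2 = false ∧ (r.1 = ' ' ∨ r.1 = '\t') then '\n' else r.1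
  (acc.1 ++ [c2], r.2)

def pvStepA3 (acc : String × Bool) (c : Char) : String × Bool :=
  if c ≠ '\n' then (acc.1.push c, false)
  else if acc.2 = false then (acc.1.push '\n', true) else acc

-- the trailing-newline strip: `while s[len(s)-1:] == '\n': s = s[:len(s)-1]`
def pvStripA (s : String) : String :=
  if h : PySem.Str.slice s (some (PySem.Str.len s - 1)) none = "\n" then
    pvStripA (PySem.Str.slice s none (some (PySem.Str.len s - 1)))
  else s
termination_by s.toList.length
decreasing_by
  have hne : s.toList ≠ [] := by
    intro h0
    have := congrArg String.toList h
    rw [PySem.Str.toList_slice, PySem.Chars.slice_eq_listSlice] at this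
    simp [h0, PySem.List.slice] at this
  rw [PySem.Str.toList_slice, PySem.Chars.slice_eq_listSlice]
  have hlen : PySem.Str.len s = (s.toList.length : Int) := by simp [PySem.Str.len]
  have hpos : 0 < s.toList.length := List.length_pos_iff.mpr hne
  rw [hlen, PySem.List.slice_to _ (by omega : (0:Int) ≤ (s.toList.length : Int) - 1)]
  simp only [List.length_take]
  omega

def parse_py (line : String) : List String :=
  -- chars = []; for c in line: chars.append(c)
  let chars : List Char := line.toList.foldl (fun acc c => acc ++ [c]) []
  -- for x in range(len(chars)): rewrite chars[x] in place, carrying inquote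
  let p2 : List Char × Bool := chars.foldl pvStepA2 (([] : List Char), false)
  -- s = ""; _lastwasn = False; collapse runs of '\n'
  let sb : String × Bool := p2.1.foldl pvStepA3 ("", false)
  let s := pvStripA sb.1
  (PySem.Str.split? s "\n").getD []

-- ===== PORT B =====

def pvStepB (acc : List Char × Bool) (c : Char) : List Char × Bool :=
  if c = '"' ∨ c = '\r' then (acc.1 ++ ['\n'], !acc.2)
  else if (c = ' ' ∨ c = '\t') ∧ acc.2 = false then (acc.1 ++ ['\n'], acc.2)
  else (acc.1 ++ [c], acc.2)

def parse_py_alt (line : String) : List String :=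
  let res : List Char × Bool := line.toList.foldl pvStepB (([] : List Char), false)
  let s : String := String.ofList res.1        -- ''.join(out)
  let fields := ((PySem.Str.split? s "\n").getD []).filter (fun f => f ≠ "")
  if fields = [] then [""]
  else if PySem.Str.startswith s "\n" then "" :: fields
  else fields

-- ===== PRECONDITION & SPEC =====
def Spec_parse_py (line : String) (out : List String) : Prop := out = parse_py_alt line
instance (line : String) (out : List String) : Decidable (Spec_parse_py line out) := by unfold Spec_parse_py; infer_instance

-- ===== CLAIM (what is proved, stated in full; the proofs are below) =====
def Claim_equal_parse_py : Prop := ∀ (line : String), Dom_parse_py line → Spec_parse_py line (parse_py line)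

-- ===== LEMMAS AND PROOFS =====

-- the common separator-normalization, written right-recursively for proofs
def pvNorm : Bool → List Char → List Char
  | _, [] => []
  | q, c :: cs =>
    if c = '"' ∨ c = '\r' then '\n' :: pvNorm (!q) cs
    else if (c = ' ' ∨ c = '\t') ∧ q = false then '\n' :: pvNorm q cs
    else c :: pvNorm q cs

-- collapse runs of '\n' (state = "last emitted was a newline")
def pvCollapse : Bool → List Char → List Char
  | _, [] => []
  | b, c :: cs =>
    if c = '\n' then (if b then pvCollapse true cs else '\n' :: pvCollapse true cs)
    else c :: pvCollapse false cs

-- remove a trailing run of '\n'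
def pvDropT : List Char → List Char
  | [] => []
  | c :: l =>
    match pvDropT l with
    | [] => if c = '\n' then [] else [c]
    | r  => c :: r

-- the '\n'-separated segments of a char list (= str.split('\n'))
def pvSegs : List Char → List (List Char)
  | [] => [[]]
  | c :: cs =>
    if c = '\n' then [] :: pvSegs cs
    else
      match pvSegs cs with
      | [] => [[c]]
      | s :: ss => (c :: s) :: ss

theorem pvSegs_ne_nil (cs : List Char) : pvSegs cs ≠ [] := by
  cases cs with
  | nil => simp [pvSegs]
  | cons c cs =>
    simp only [pvSegs]
    split <;> [simp; (cases h : pvSegs cs <;> simp)]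

theorem pvNorm_A (cs : List Char) (acc : List Char) (q : Bool) :
    (cs.foldl pvStepA2 (acc, q)).1 = acc ++ pvNorm q cs := by
  induction cs generalizing acc q with
  | nil => simp [pvNorm]
  | cons c cs ih =>
    simp only [List.foldl_cons, pvNorm, pvStepA2]
    by_cases h1 : c = '"' ∨ c = '\r'
    · simp only [if_pos h1]
      rw [ih]
      have : ¬((!q) = false ∧ (('\n' : Char) = ' ' ∨ ('\n' : Char) = '\t')) := by
        rintro ⟨-, h | h⟩ <;> simp at h
      simp
    · simp only [if_neg h1]
      by_cases h2 : (c = ' ' ∨ c = '\t') ∧ q = false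
      · have h2' : q = false ∧ (c = ' ' ∨ c = '\t') := ⟨h2.2, h2.1⟩
        simp only [if_pos h2, if_pos h2']
        rw [ih]; simp
      · have h2' : ¬(q = false ∧ (c = ' ' ∨ c = '\t')) := fun h => h2 ⟨h.2, h.1⟩
        simp only [if_neg h2, if_neg h2']
        rw [ih]; simp
theorem pvNorm_B (cs : List Char) (acc : List Char) (q : Bool) :
    (cs.foldl pvStepB (acc, q)).1 = acc ++ pvNorm q cs := by
  induction cs generalizing acc q with
  | nil => simp [pvNorm]
  | cons c cs ih =>
    simp only [List.foldl_cons, pvNorm, pvStepB]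
    by_cases h1 : c = '"' ∨ c = '\r'
    · simp only [if_pos h1]; rw [ih]; simp
    · simp only [if_neg h1]
      by_cases h2 : (c = ' ' ∨ c = '\t') ∧ q = false
      · simp only [if_pos h2]; rw [ih]; simp
      · simp only [if_neg h2]; rw [ih]; simp
theorem pvCollapse_loop (cs : List Char) (s : String) (b : Bool) :
    ((cs.foldl pvStepA3 (s, b)).1).toList = s.toList ++ pvCollapse b cs := by
  induction cs generalizing s b with
  | nil => simp [pvCollapse]
  | cons c cs ih =>
    simp only [List.foldl_cons]
    by_cases h1 : c = '\n'
    · subst h1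
      cases b with
      | false =>
        rw [show pvStepA3 (s, false) '\n' = (s.push '\n', true) by simp [pvStepA3]]
        rw [ih]; simp [pvCollapse, String.toList_push]
      | true =>
        rw [show pvStepA3 (s, true) '\n' = (s, true) by simp [pvStepA3]]
        rw [ih]; simp [pvCollapse]
    · rw [show pvStepA3 (s, b) c = (s.push c, false) by simp [pvStepA3, h1]]
      rw [ih]; simp [pvCollapse, String.toList_push, h1]
theorem slice_last_eq (s : String) (ys : List Char) (y : Char) (h : s.toList = ys ++ [y]) :
    (PySem.Str.slice s (some (PySem.Str.len s - 1)) none).toList = [y] := by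
  rw [PySem.Str.toList_slice, PySem.Chars.slice_eq_listSlice]
  have hlen : PySem.Str.len s = (s.toList.length : Int) := by simp [PySem.Str.len]
  rw [hlen, h]
  rw [PySem.List.slice_from _ (by simp)]
  simp

theorem slice_init_eq (s : String) (ys : List Char) (y : Char) (h : s.toList = ys ++ [y]) :
    (PySem.Str.slice s none (some (PySem.Str.len s - 1))).toList = ys := by
  rw [PySem.Str.toList_slice, PySem.Chars.slice_eq_listSlice]
  have hlen : PySem.Str.len s = (s.toList.length : Int) := by simp [PySem.Str.len]
  rw [hlen, h, PySem.List.slice_to _ (by simp)]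
  simp

theorem pvStripA_toList (s : String) :
    (pvStripA s).toList = (s.toList.reverse.dropWhile (· = '\n')).reverse := by
  induction s using pvStripA.induct with
  | case1 s h ih =>
    rw [pvStripA, dif_pos h]
    rcases s.toList.eq_nil_or_concat with h0 | ⟨ys, y, h0'⟩
    · exfalso
      have := congrArg String.toList h
      rw [PySem.Str.toList_slice, PySem.Chars.slice_eq_listSlice] at this
      simp [h0, PySem.List.slice] at this
    · have h0 : s.toList = ys ++ [y] := by simpa [List.concat_eq_append] using h0'
      have hy : y = '\n' := by
        have := congrArg String.toList h
        rw [slice_last_eq s ys y h0] at this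
        simpa using this
      rw [ih, h0, slice_init_eq s ys y h0, hy]
      simp
  | case2 s h =>
    rw [pvStripA, dif_neg h]
    rcases s.toList.eq_nil_or_concat with h0 | ⟨ys, y, h0'⟩
    · simp [h0]
    · have h0 : s.toList = ys ++ [y] := by simpa [List.concat_eq_append] using h0'
      have hy : y ≠ '\n' := by
        intro hy
        apply h
        apply String.toList_inj.mp
        rw [slice_last_eq s ys y h0, hy]
        decide
      rw [h0]
      simp [hy]

theorem pvDropT_eq (l : List Char) :
    pvDropT l = (l.reverse.dropWhile (· = '\n')).reverse := by
  induction l with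
  | nil => simp [pvDropT]
  | cons c l ih =>
    simp only [pvDropT, List.reverse_cons, List.dropWhile_append]
    cases h : pvDropT l with
    | nil =>
      have : (l.reverse.dropWhile (· = '\n')) = [] := by
        have := ih; rw [h] at this
        exact (List.reverse_eq_nil_iff.mp this.symm)
      simp [this, List.dropWhile]
      by_cases hc : c = '\n' <;> simp [hc]
    | cons r rs =>
      have hne : (l.reverse.dropWhile (· = '\n')) ≠ [] := by
        intro h0
        rw [h0] at ih
        rw [h] at ih; simp at ih
      simp [List.isEmpty_iff, hne, ← ih, h]

theorem pvSplitOn_go (fuel : Nat) (l cur : List Char) (acc : List (List Char))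
    (h : l.length < fuel) :
    PySem.Chars.splitOn.go ['\n'] fuel l cur acc
      = acc.reverse ++ (pvSegs l).modifyHead (cur.reverse ++ ·) := by
  induction fuel generalizing l cur acc with
  | zero => omega
  | succ fuel ih =>
    cases l with
    | nil => simp [PySem.Chars.splitOn.go, pvSegs]
    | cons c rest =>
      by_cases hc : c = '\n'
      · subst hc
        rw [show PySem.Chars.splitOn.go ['\n'] (fuel+1) ('\n'::rest) cur acc
            = PySem.Chars.splitOn.go ['\n'] fuel rest [] (cur.reverse :: acc) by
          simp [PySem.Chars.splitOn.go, List.isPrefixOf]]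
        rw [ih _ _ _ (by simpa using h)]
        cases hs : pvSegs rest with
        | nil => exact absurd hs (pvSegs_ne_nil rest)
        | cons s ss => simp [pvSegs, hs]
      · rw [show PySem.Chars.splitOn.go ['\n'] (fuel+1) (c::rest) cur acc
            = PySem.Chars.splitOn.go ['\n'] fuel rest (c :: cur) acc by
          simp only [PySem.Chars.splitOn.go, List.isPrefixOf]
          rw [if_neg (by simp [Ne.symm hc])]]
        rw [ih _ _ _ (by simpa using h)]
        cases hs : pvSegs rest with
        | nil => exact absurd hs (pvSegs_ne_nil rest)
        | cons s ss => simp [pvSegs, hs, hc]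

theorem pvSplitOn_eq (l : List Char) : PySem.Chars.splitOn l ['\n'] = pvSegs l := by
  rw [PySem.Chars.splitOn, pvSplitOn_go _ _ _ _ (by omega)]
  cases hs : pvSegs l with
  | nil => exact absurd hs (pvSegs_ne_nil l)
  | cons s ss => simp

theorem pvCollapse_true (cs : List Char) :
    pvCollapse true cs = pvCollapse false (cs.dropWhile (· = '\n')) := by
  induction cs with
  | nil => simp [pvCollapse]
  | cons c cs ih =>
    by_cases hc : c = '\n'
    · subst hc
      simp [pvCollapse, ih]
    · simp [pvCollapse, hc]

theorem pvSegs_dropWhile_filter (cs : List Char) :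
    (pvSegs (cs.dropWhile (· = '\n'))).filter (fun x => x ≠ []) = (pvSegs cs).filter (fun x => x ≠ []) := by
  induction cs with
  | nil => simp
  | cons c cs ih =>
    by_cases hc : c = '\n'
    · subst hc
      simp only [List.dropWhile_cons]
      rw [if_pos (by simp)]
      rw [ih]
      simp [pvSegs]
    · simp [hc]

theorem pvDropT_cons_ne (d : Char) (l : List Char) (hd : d ≠ '\n') :
    pvDropT (d :: l) = d :: pvDropT l := by
  simp only [pvDropT]
  cases h : pvDropT l with
  | nil => simp [hd]
  | cons r rs => rfl

theorem pvMain (n : Nat) (cs : List Char) (h : cs.length ≤ n) :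
    pvSegs (pvDropT (pvCollapse false cs))
      = match pvSegs cs with
        | s :: ss => s :: ss.filter (fun x => x ≠ [])
        | [] => [[]] := by
  induction n generalizing cs with
  | zero =>
    have : cs = [] := by cases cs <;> simp_all
    subst this
    simp [pvCollapse, pvDropT, pvSegs]
  | succ n ih =>
    cases cs with
    | nil => simp [pvCollapse, pvDropT, pvSegs]
    | cons c cs =>
      have hlen : cs.length ≤ n := by simpa using h
      by_cases hc : c = '\n'
      · subst hc
        rw [show pvCollapse false ('\n'::cs) = '\n' :: pvCollapse true cs by simp [pvCollapse]]
        rw [pvCollapse_true]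
        have hlends : (cs.dropWhile (· = '\n')).length ≤ n := by
          have := List.length_dropWhile_le (p := fun x => decide (x = '\n')) cs
          omega
        cases hd : cs.dropWhile (· = '\n') with
        | nil =>
          have hfilter : (pvSegs cs).filter (fun x => x ≠ []) = [] := by
            rw [← pvSegs_dropWhile_filter, hd]
            simp [pvSegs]
          have hfilter' : List.filter (fun x => !decide (x = [])) (pvSegs cs) = [] := by
            simpa using hfilter
          simp only [pvCollapse, pvDropT, pvSegs]
          simp [hfilter']
          rfl
        | cons d ds' =>
          have hdnl : d ≠ '\n' := by
            have := List.head?_dropWhile_not (p := fun x => decide (x = '\n')) cs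
            rw [hd] at this
            simpa using this
          rw [hd] at hlends
          have hih := ih (d :: ds') hlends
          rw [show pvCollapse false (d::ds') = d :: pvCollapse false ds' by simp [pvCollapse, hdnl]] at hih ⊢
          -- note: goal now mentions pvCollapse false ds' under '\n' ::
          rw [pvDropT_cons_ne d _ hdnl] at hih
          -- pvDropT ('\n' :: d :: rest) = '\n' :: d :: pvDropT rest
          rw [show pvDropT ('\n' :: d :: pvCollapse false ds')
              = '\n' :: d :: pvDropT (pvCollapse false ds') by
            conv_lhs => rw [pvDropT, pvDropT_cons_ne d _ hdnl]]
          rw [show pvSegs ('\n' :: d :: pvDropT (pvCollapse false ds'))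
              = [] :: pvSegs (d :: pvDropT (pvCollapse false ds')) by simp [pvSegs]]
          rw [hih]
          -- RHS
          rw [show pvSegs ('\n'::cs) = [] :: pvSegs cs by simp [pvSegs]]
          rw [show (match ([] :: pvSegs cs : List (List Char)) with
              | s :: ss => s :: List.filter (fun x => decide (x ≠ [])) ss
              | [] => [[]]) = [] :: List.filter (fun x => decide (x ≠ [])) (pvSegs cs) from rfl]
          rw [← pvSegs_dropWhile_filter cs, hd]
          cases hsd : pvSegs (d :: ds') with
          | nil => exact absurd hsd (pvSegs_ne_nil _)
          | cons s ss =>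
            have hsne : s ≠ [] := by
              revert hsd
              simp only [pvSegs, if_neg hdnl]
              cases pvSegs ds' with
              | nil => intro h'; cases h'; simp
              | cons a as => intro h'; cases h'; simp
            simp [hsne]
      · have hih := ih cs hlen
        rw [show pvCollapse false (c::cs) = c :: pvCollapse false cs by simp [pvCollapse, hc]]
        rw [pvDropT_cons_ne c _ hc]
        cases hscs : pvSegs cs with
        | nil => exact absurd hscs (pvSegs_ne_nil _)
        | cons s ss =>
          rw [hscs] at hih
          rw [show pvSegs (c :: pvDropT (pvCollapse false cs))
              = match pvSegs (pvDropT (pvCollapse false cs)) with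
                | [] => [[c]]
                | s :: ss => (c :: s) :: ss by simp [pvSegs, hc]]
          rw [hih]
          rw [show pvSegs (c::cs) = (c :: s) :: ss by simp [pvSegs, hc, hscs]]

theorem pvSplit?_eq (s : String) :
    (PySem.Str.split? s "\n").getD [] = (pvSegs s.toList).map String.ofList := by
  have h := PySem.Str.split?_map s "\n"
  rw [show ("\n":String).toList = ['\n'] from rfl, PySem.Chars.split?] at h
  rw [if_neg (by simp)] at h
  rw [pvSplitOn_eq] at h
  cases hsp : PySem.Str.split? s "\n" with
  | none => rw [hsp] at h; simp at h
  | some r =>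
    rw [hsp] at h
    simp only [Option.map_some, Option.some.injEq] at h
    have : r = (pvSegs s.toList).map String.ofList := by
      rw [← h, List.map_map]
      simp [Function.comp_def, String.ofList_toList]
    simp [this]

theorem pvFilter_map_ofList (X : List (List Char)) :
    (X.map String.ofList).filter (fun f => f ≠ "") = (X.filter (fun x => x ≠ [])).map String.ofList := by
  rw [List.filter_map]
  congr 1
  apply List.filter_congr
  intro x _
  simp

theorem pvSegs_cons_ne (c : Char) (t : List Char) (hc : c ≠ '\n') :
    ∃ s' ss, pvSegs (c :: t) = (c :: s') :: ss ∧ pvSegs t = s' :: ss := by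
  cases h : pvSegs t with
  | nil => exact absurd h (pvSegs_ne_nil t)
  | cons s ss => exact ⟨s, ss, by simp [pvSegs, hc, h], rfl⟩

theorem pvFinal (ns : List Char) :
    (match pvSegs ns with
      | s :: ss => s :: ss.filter (fun x => x ≠ [])
      | [] => [[]]).map String.ofList
    = (if ((pvSegs ns).filter (fun x => x ≠ [])).map String.ofList = [] then [""]
       else if PySem.Str.startswith (String.ofList ns) "\n" then
         "" :: ((pvSegs ns).filter (fun x => x ≠ [])).map String.ofList
       else ((pvSegs ns).filter (fun x => x ≠ [])).map String.ofList) := by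
  cases ns with
  | nil => simp [pvSegs]
  | cons c t =>
    by_cases hc : c = '\n'
    · subst hc
      rw [show pvSegs ('\n'::t) = [] :: pvSegs t by simp [pvSegs]]
      rw [show (([] :: pvSegs t).filter (fun x => x ≠ [])) = (pvSegs t).filter (fun x => x ≠ []) by simp]
      by_cases hf : (pvSegs t).filter (fun x => x ≠ []) = []
      · have h' : ∀ a ∈ pvSegs t, a = [] := fun a ha => by
          simpa using List.filter_eq_nil_iff.mp hf a ha
        rw [hf]
        simp
        exact h'
      · rw [if_neg (fun h => hf (List.map_eq_nil_iff.mp h))]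
        rw [if_pos (by
          rw [PySem.Str.startswith_eq]
          simp only [String.toList_ofList]
          rw [PySem.Chars.startswith_iff]
          exact ⟨t, rfl⟩)]
        simp
    · obtain ⟨s', ss, h1, _⟩ := pvSegs_cons_ne c t hc
      rw [h1]
      rw [show (((c :: s') :: ss).filter (fun x => x ≠ [])) = (c :: s') :: ss.filter (fun x => x ≠ []) by simp]
      rw [if_neg (by simp)]
      rw [if_neg (by
        rw [PySem.Str.startswith_eq]
        simp only [String.toList_ofList]
        rw [show (("\n":String).toList) = ['\n'] from rfl]
        rw [PySem.Chars.startswith_iff]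
        intro hpre
        rcases hpre with ⟨u, hu⟩
        cases hu
        exact hc rfl)]

-- ===== VERDICT (by name: the statement is the Claim_ definition above) =====
theorem parse_py_spec : Claim_equal_parse_py := by
  intro line _
  unfold Spec_parse_py
  show parse_py line = parse_py_alt line
  simp only [parse_py, parse_py_alt]
  rw [PySem.List.foldl_append_singleton]
  simp only [List.nil_append]
  rw [pvNorm_A line.toList [] false, pvNorm_B line.toList [] false]
  simp only [List.nil_append]
  rw [pvSplit?_eq, pvSplit?_eq]
  rw [pvStripA_toList, ← pvDropT_eq]
  rw [pvCollapse_loop]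
  simp only [String.toList_ofList, show ("".toList : List Char) = [] from rfl, List.nil_append]
  rw [pvMain (pvNorm false line.toList).length _ le_rfl]
  rw [pvFilter_map_ofList]
  exact pvFinal (pvNorm false line.toList)
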